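-- pv_equiv track=rewrite | github.com/kingofdot/tools | tools/pdf-to-dxf-ai/ai_extract.py | _salvage_truncated
-- ===== SOURCE A (Python) =====
-- from typing import Callable, Optional
--
-- def _salvage_truncated(raw: str) -> Optional[str]:
--     """max_tokens 등으로 잘린 JSON을 마지막으로 완료된 객체까지만 남기고 닫는다."""
--     if not raw.lstrip().startswith("{"):
--         return None
--     depth_obj = 0
--     depth_arr = 0
--     in_str = False
--     esc = False
--     start = raw.find("{")
--     i = start
--     last_complete_member_end = -1   # depth_obj==1 에서 , 를 만난 위치
--     while i < len(raw):
--         c = raw[i]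
--         if esc:
--             esc = False
--         elif c == "\\" and in_str:
--             esc = True
--         elif c == '"':
--             in_str = not in_str
--         elif not in_str:
--             if c == "{":
--                 depth_obj += 1
--             elif c == "}":
--                 depth_obj -= 1
--             elif c == "[":
--                 depth_arr += 1
--             elif c == "]":
--                 depth_arr -= 1
--             elif c == "," and depth_obj == 1 and depth_arr == 0:
--                 # 최상위 key: value, 바로 뒤 — 이 지점까지는 안전하게 자를 수 있음
--                 last_complete_member_end = i
--         i += 1
--     if last_complete_member_end < 0:
--         return None
--     # last_complete_member_end 앞까지 자르고, 남아있던 깊이만큼 닫아준다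
--     trimmed = raw[start:last_complete_member_end]
--     # trimmed 기준으로 현재 깊이 다시 계산
--     d_obj = 0
--     d_arr = 0
--     in_str = False
--     esc = False
--     for c in trimmed:
--         if esc:
--             esc = False
--             continue
--         if c == "\\" and in_str:
--             esc = True
--             continue
--         if c == '"':
--             in_str = not in_str
--             continue
--         if in_str:
--             continue
--         if c == "{":
--             d_obj += 1
--         elif c == "}":
--             d_obj -= 1
--         elif c == "[":
--             d_arr += 1
--         elif c == "]":
--             d_arr -= 1
--     closing = "]" * d_arr + "}" * d_obj
--     return trimmed + closing
-- ===== SOURCE B (Python) =====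
-- def _salvage_truncated(raw):
--     """Single scan: remember the index of the last top-level comma; since the
--     tracked depth there is always (obj=1, arr=0, outside a string), the closer
--     is the constant "}" and A's whole second depth-recomputing pass is dropped."""
--     if not raw.lstrip().startswith("{"):
--         return None
--     d_obj = d_arr = 0
--     in_str = esc = False
--     last = None
--     for i, c in enumerate(raw):
--         if esc:
--             esc = False
--         elif c == "\\" and in_str:
--             esc = True
--         elif c == '"':
--             in_str = not in_str
--         elif not in_str:
--             if c == "{":
--                 d_obj += 1
--             elif c == "}":
--                 d_obj -= 1
--             elif c == "[":
--                 d_arr += 1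
--             elif c == "]":
--                 d_arr -= 1
--             elif c == "," and d_obj == 1 and d_arr == 0:
--                 last = i
--     if last is None:
--         return None
--     return raw[:last].lstrip() + "}"
-- ===== Notes on version B (the rewrite author's own statement) =====
-- stated objective: simpler
-- what changed: B does a single scan that records the index of the last top-level comma and appends a single closing brace (proved: the tracked depth at that comma is always obj=1, arr=0, outside a string), deleting A's entire second depth-recomputing pass over the trimmed prefix and its repeat-the-brackets closer reconstruction.
import Mathlib
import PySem

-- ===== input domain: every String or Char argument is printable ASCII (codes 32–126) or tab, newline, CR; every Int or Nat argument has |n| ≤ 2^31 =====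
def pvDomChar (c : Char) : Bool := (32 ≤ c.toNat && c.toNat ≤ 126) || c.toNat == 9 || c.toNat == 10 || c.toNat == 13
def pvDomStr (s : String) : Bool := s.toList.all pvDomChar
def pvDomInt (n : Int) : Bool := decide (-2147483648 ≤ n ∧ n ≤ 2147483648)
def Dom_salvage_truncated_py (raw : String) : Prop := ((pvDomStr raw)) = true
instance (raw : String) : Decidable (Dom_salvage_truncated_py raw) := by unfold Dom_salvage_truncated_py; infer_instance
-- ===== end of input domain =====

-- B replaces A's two passes (scan for the last top-level comma, then re-scan the trimmed
-- prefix to recompute depths) by a single scan whose closing is the constant "}"; objective: simpler.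

-- ===== PORT A =====
-- the `while i < len(raw)` scan: recursion over the remaining characters, i the absolute index
def pyA_loop1 : List Char → Int → Int → Int → Bool → Bool → Int → Int
  | [], _, _, _, _, _, last => last
  | c :: cs, i, dObj, dArr, inStr, esc, last =>
    if esc then pyA_loop1 cs (i+1) dObj dArr inStr false last
    else if c == '\\' && inStr then pyA_loop1 cs (i+1) dObj dArr inStr true last
    else if c == '"' then pyA_loop1 cs (i+1) dObj dArr (!inStr) esc last
    else if !inStr then
      (if c == '{' then pyA_loop1 cs (i+1) (dObj+1) dArr inStr esc last
       else if c == '}' then pyA_loop1 cs (i+1) (dObj-1) dArr inStr esc last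
       else if c == '[' then pyA_loop1 cs (i+1) dObj (dArr+1) inStr esc last
       else if c == ']' then pyA_loop1 cs (i+1) dObj (dArr-1) inStr esc last
       else if c == ',' && dObj == 1 && dArr == 0 then pyA_loop1 cs (i+1) dObj dArr inStr esc i
       else pyA_loop1 cs (i+1) dObj dArr inStr esc last)
    else pyA_loop1 cs (i+1) dObj dArr inStr esc last

-- the `for c in trimmed` depth recomputation
def pyA_loop2 : List Char → Int → Int → Bool → Bool → Int × Int
  | [], dObj, dArr, _, _ => (dObj, dArr)
  | c :: cs, dObj, dArr, inStr, esc =>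
    if esc then pyA_loop2 cs dObj dArr inStr false
    else if c == '\\' && inStr then pyA_loop2 cs dObj dArr inStr true
    else if c == '"' then pyA_loop2 cs dObj dArr (!inStr) esc
    else if inStr then pyA_loop2 cs dObj dArr inStr esc
    else if c == '{' then pyA_loop2 cs (dObj+1) dArr inStr esc
    else if c == '}' then pyA_loop2 cs (dObj-1) dArr inStr esc
    else if c == '[' then pyA_loop2 cs dObj (dArr+1) inStr esc
    else if c == ']' then pyA_loop2 cs dObj (dArr-1) inStr esc
    else pyA_loop2 cs dObj dArr inStr esc

def salvage_truncated_py (raw : String) : Option String :=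
  if !(PySem.Str.startswith (PySem.Str.lstrip raw) "{") then none
  else
    let start := PySem.Str.find raw "{"
    let last := pyA_loop1 (PySem.List.slice raw.toList (some start) none) start 0 0 false false (-1)
    if last < 0 then none
    else
      let trimmed := PySem.List.slice raw.toList (some start) (some last)
      let p := pyA_loop2 trimmed 0 0 false false
      some (String.ofList (trimmed ++ PySem.List.pyRepeat [']'] p.2 ++ PySem.List.pyRepeat ['}'] p.1))

-- ===== PORT B =====
-- the body of B's single `for i, c in enumerate(raw)` loop; state (d_obj, d_arr, in_str, esc, last)
def pyB_step (st : Int × Int × Bool × Bool × Option Int) (p : Int × Char) :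
    Int × Int × Bool × Bool × Option Int :=
  match st, p with
  | (dObj, dArr, inStr, esc, last), (i, c) =>
    if esc then (dObj, dArr, inStr, false, last)
    else if c == '\\' && inStr then (dObj, dArr, inStr, true, last)
    else if c == '"' then (dObj, dArr, !inStr, esc, last)
    else if !inStr then
      (if c == '{' then (dObj+1, dArr, inStr, esc, last)
       else if c == '}' then (dObj-1, dArr, inStr, esc, last)
       else if c == '[' then (dObj, dArr+1, inStr, esc, last)
       else if c == ']' then (dObj, dArr-1, inStr, esc, last)
       else if c == ',' && dObj == 1 && dArr == 0 then (dObj, dArr, inStr, esc, some i)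
       else (dObj, dArr, inStr, esc, last))
    else (dObj, dArr, inStr, esc, last)

def salvage_truncated_py_alt (raw : String) : Option String :=
  if !(PySem.Str.startswith (PySem.Str.lstrip raw) "{") then none
  else
    let r := (PySem.List.enumerate raw.toList).foldl pyB_step (0, 0, false, false, none)
    match r.2.2.2.2 with
    | none => none
    | some last =>
      some (String.ofList (PySem.Chars.lstrip (PySem.List.slice raw.toList none (some last)) ++ ['}']))

-- ===== PRECONDITION & SPEC =====
def Spec_salvage_truncated_py (raw : String) (out : Option String) : Prop := out = salvage_truncated_py_alt raw
instance (raw : String) (out : Option String) : Decidable (Spec_salvage_truncated_py raw out) := by unfold Spec_salvage_truncated_py; infer_instance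

-- ===== CLAIM (what is proved, stated in full; the proofs are below) =====
def Claim_equal_salvage_truncated_py : Prop := ∀ (raw : String), Dom_salvage_truncated_py raw → Spec_salvage_truncated_py raw (salvage_truncated_py raw)

-- ===== LEMMAS AND PROOFS =====

-- the common state transition of all three scans
def pvStep (st : Int × Int × Bool × Bool) (c : Char) : Int × Int × Bool × Bool :=
  match st with
  | (dObj, dArr, inStr, esc) =>
    if esc then (dObj, dArr, inStr, false)
    else if c == '\\' && inStr then (dObj, dArr, inStr, true)
    else if c == '"' then (dObj, dArr, !inStr, esc)
    else if !inStr then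
      (if c == '{' then (dObj+1, dArr, inStr, esc)
       else if c == '}' then (dObj-1, dArr, inStr, esc)
       else if c == '[' then (dObj, dArr+1, inStr, esc)
       else if c == ']' then (dObj, dArr-1, inStr, esc)
       else (dObj, dArr, inStr, esc))
    else (dObj, dArr, inStr, esc)

-- "this character is a top-level comma in this state"
def pvEvent (st : Int × Int × Bool × Bool) (c : Char) : Bool :=
  match st with
  | (dObj, dArr, inStr, esc) => !esc && !inStr && (c == ',') && (dObj == 1) && (dArr == 0)

-- pure form of the comma-tracking scan
def pvScan : List Char → Int → (Int × Int × Bool × Bool) → Option Int → Option Int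
  | [], _, _, acc => acc
  | c :: cs, i, st, acc => pvScan cs (i+1) (pvStep st c) (if pvEvent st c then some i else acc)

theorem pyA_loop1_cons (c : Char) (cs : List Char) (i dO dA : Int) (s e : Bool) (last : Int) :
    pyA_loop1 (c :: cs) i dO dA s e last =
      pyA_loop1 cs (i+1) (pvStep (dO, dA, s, e) c).1 (pvStep (dO, dA, s, e) c).2.1
        (pvStep (dO, dA, s, e) c).2.2.1 (pvStep (dO, dA, s, e) c).2.2.2
        (if pvEvent (dO, dA, s, e) c then i else last) := by
  simp only [pyA_loop1, pvStep, pvEvent]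
  split_ifs <;> simp_all [Bool.and_eq_true, beq_iff_eq]

theorem pyA_loop2_cons (c : Char) (cs : List Char) (dO dA : Int) (s e : Bool) :
    pyA_loop2 (c :: cs) dO dA s e =
      pyA_loop2 cs (pvStep (dO, dA, s, e) c).1 (pvStep (dO, dA, s, e) c).2.1
        (pvStep (dO, dA, s, e) c).2.2.1 (pvStep (dO, dA, s, e) c).2.2.2 := by
  simp only [pyA_loop2, pvStep]
  split_ifs <;> simp_all [Bool.and_eq_true, beq_iff_eq]

theorem pyB_step_eq (c : Char) (i dO dA : Int) (s e : Bool) (last : Option Int) :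
    pyB_step (dO, dA, s, e, last) (i, c) =
      ((pvStep (dO, dA, s, e) c).1, (pvStep (dO, dA, s, e) c).2.1,
       (pvStep (dO, dA, s, e) c).2.2.1, (pvStep (dO, dA, s, e) c).2.2.2,
       if pvEvent (dO, dA, s, e) c then some i else last) := by
  simp only [pyB_step, pvStep, pvEvent]
  split_ifs <;> simp_all [Bool.and_eq_true, beq_iff_eq]

theorem pvScan_acc (l : List Char) : ∀ (i : Int) st acc,
    pvScan l i st acc = (pvScan l i st none).or acc := by
  induction l with
  | nil => intro i st acc; simp [pvScan]
  | cons c cs ih =>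
    intro i st acc
    simp only [pvScan]
    by_cases h : pvEvent st c = true
    · simp only [h, if_true]
      rw [ih (i+1) (pvStep st c) (some i)]
      generalize pvScan cs (i+1) (pvStep st c) none = X
      cases X <;> cases acc <;> rfl
    · simp only [h, Bool.false_eq_true, if_false]
      exact ih _ _ _

theorem pyA_loop1_eq_scan (l : List Char) : ∀ (i : Int) dO dA (s e : Bool) (last : Int),
    pyA_loop1 l i dO dA s e last = (pvScan l i (dO, dA, s, e) none).getD last := by
  induction l with
  | nil => intro i dO dA s e last; simp [pyA_loop1, pvScan]
  | cons c cs ih =>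
    intro i dO dA s e last
    rcases hst : pvStep (dO, dA, s, e) c with ⟨dO', dA', s', e'⟩
    simp only [pyA_loop1_cons, pvScan, hst]
    by_cases h : pvEvent (dO, dA, s, e) c = true
    · simp only [h, if_true]
      rw [ih (i+1) dO' dA' s' e' i, pvScan_acc cs (i+1) (dO', dA', s', e') (some i)]
      generalize pvScan cs (i + 1) (dO', dA', s', e') none = X
      cases X <;> simp
    · simp only [if_neg h]
      exact ih (i+1) dO' dA' s' e' last

theorem pyA_loop2_eq_fold (l : List Char) : ∀ dO dA (s e : Bool),
    pyA_loop2 l dO dA s e = ((l.foldl pvStep (dO, dA, s, e)).1, (l.foldl pvStep (dO, dA, s, e)).2.1) := by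
  induction l with
  | nil => intro dO dA s e; simp [pyA_loop2]
  | cons c cs ih =>
    intro dO dA s e
    rcases hst : pvStep (dO, dA, s, e) c with ⟨dO', dA', s', e'⟩
    simp only [pyA_loop2_cons, List.foldl_cons, hst]
    exact ih dO' dA' s' e'

theorem pyB_foldl_eq_scan (l : List Char) : ∀ (i : Int) dO dA (s e : Bool) acc,
    (PySem.List.enumerate l i).foldl pyB_step (dO, dA, s, e, acc) =
      ((l.foldl pvStep (dO, dA, s, e)).1, (l.foldl pvStep (dO, dA, s, e)).2.1,
       (l.foldl pvStep (dO, dA, s, e)).2.2.1, (l.foldl pvStep (dO, dA, s, e)).2.2.2,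
       pvScan l i (dO, dA, s, e) acc) := by
  induction l with
  | nil => intro i dO dA s e acc; simp [PySem.List.enumerate_nil, pvScan]
  | cons c cs ih =>
    intro i dO dA s e acc
    rcases hst : pvStep (dO, dA, s, e) c with ⟨dO', dA', s', e'⟩
    simp only [PySem.List.enumerate_cons, List.foldl_cons, pyB_step_eq, pvScan, hst]
    by_cases h : pvEvent (dO, dA, s, e) c = true
    · simp only [h, if_true]
      exact ih (i+1) dO' dA' s' e' (some i)
    · simp only [if_neg h]
      exact ih (i+1) dO' dA' s' e' acc

theorem pvScan_some (l : List Char) : ∀ (i : Int) st j, pvScan l i st none = some j →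
    ∃ k : Nat, k < l.length ∧ j = i + k ∧ (l.take k).foldl pvStep st = (1, 0, false, false) := by
  induction l with
  | nil => intro i st j h; simp [pvScan] at h
  | cons c cs ih =>
    intro i st j h
    simp only [pvScan] at h
    by_cases hev : pvEvent st c = true
    · rw [if_pos hev, pvScan_acc] at h
      have hst : st = (1, 0, false, false) := by
        rcases st with ⟨a, b, u, v⟩
        simp [pvEvent, Bool.and_eq_true, beq_iff_eq] at hev
        obtain ⟨⟨⟨⟨hv, hu⟩, _⟩, ha⟩, hb⟩ := hev
        simp [ha, hb, hu, hv]
      cases hscan : pvScan cs (i+1) (pvStep st c) none with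
      | none =>
        rw [hscan] at h
        simp [Option.or] at h
        exact ⟨0, by simp, by omega, by simpa using hst⟩
      | some j' =>
        rw [hscan] at h
        simp [Option.or] at h
        obtain ⟨k', hk', hj', hf'⟩ := ih (i+1) (pvStep st c) j' hscan
        exact ⟨k' + 1, by simpa using Nat.succ_lt_succ hk', by push_cast; omega, by simpa using hf'⟩
    · rw [if_neg hev] at h
      obtain ⟨k', hk', hj', hf'⟩ := ih (i+1) (pvStep st c) j h
      exact ⟨k' + 1, by simpa using Nat.succ_lt_succ hk', by push_cast; omega, by simpa using hf'⟩

theorem pv_space_ne (c : Char) (h : PySem.Chars.isspace c = true) :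
    c ≠ '\\' ∧ c ≠ '"' ∧ c ≠ '{' ∧ c ≠ '}' ∧ c ≠ '[' ∧ c ≠ ']' ∧ c ≠ ',' := by
  refine ⟨?_, ?_, ?_, ?_, ?_, ?_, ?_⟩ <;> (rintro rfl; revert h; decide)

theorem pv_inert (c : Char) (h : PySem.Chars.isspace c = true) :
    (∀ (dO dA : Int) (s : Bool), pvStep (dO, dA, s, false) c = (dO, dA, s, false)) ∧
    (∀ st, pvEvent st c = false) := by
  obtain ⟨h1, h2, h3, h4, h5, h6, h7⟩ := pv_space_ne c h
  constructor
  · intro dO dA s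
    cases s <;> simp [pvStep, beq_iff_eq, h1, h2, h3, h4, h5, h6]
  · intro st
    rcases st with ⟨a, b, u, v⟩
    simp [pvEvent, beq_iff_eq, h7]

theorem pvScan_ws (ws : List Char) (hws : ∀ c ∈ ws, PySem.Chars.isspace c = true) :
    ∀ (l : List Char) (i : Int) dO dA (s : Bool) acc,
    pvScan (ws ++ l) i (dO, dA, s, false) acc = pvScan l (i + ws.length) (dO, dA, s, false) acc := by
  induction ws with
  | nil => intro l i dO dA s acc; simp
  | cons w ws' ih =>
    intro l i dO dA s acc
    have hw := hws w (by simp)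
    obtain ⟨hstep, hev⟩ := pv_inert w hw
    simp only [List.cons_append, pvScan, hstep, hev, Bool.false_eq_true, if_false]
    rw [ih (fun c hc => hws c (by simp [hc])) l (i+1) dO dA s acc]
    congr 1
    simp only [List.length_cons]
    push_cast
    omega

theorem pv_find_ws (raw : String) (ws rest : List Char)
    (hraw : raw.toList = ws ++ '{' :: rest) (hws : ∀ c ∈ ws, PySem.Chars.isspace c = true) :
    PySem.Str.find raw "{" = (ws.length : Int) := by
  have hnn : 0 ≤ PySem.Chars.find raw.toList ['{'] := by
    rw [PySem.Chars.find_nonneg_iff, hraw]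
    exact ⟨ws, rest, by simp⟩
  obtain ⟨hpre, hmin⟩ := PySem.Chars.find_spec hnn
  set F := PySem.Chars.find raw.toList ['{'] with hF
  have hne : F.toNat = ws.length := by
    rcases Nat.lt_trichotomy F.toNat ws.length with hlt | heq | hgt
    · exfalso
      rw [hraw] at hpre
      rw [List.drop_append_of_le_length (le_of_lt hlt)] at hpre
      rcases hd : ws.drop F.toNat with _ | ⟨w, ws2⟩
      · have : ws.length ≤ F.toNat := by
          have := List.drop_eq_nil_iff.mp hd
          omega
        omega
      · rw [hd] at hpre
        rcases hpre with ⟨t, ht⟩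
        have hw : w ∈ ws := List.mem_of_mem_drop (l := ws) (i := F.toNat) (by rw [hd]; simp)
        have hne7 := (pv_space_ne w (hws w hw)).2.2.1
        have hww : w = '{' := by
          have := congrArg (fun l => l.head?) ht
          simpa using this.symm
        exact hne7 hww
    · exact heq
    · exfalso
      refine hmin ws.length hgt ?_
      rw [hraw, List.drop_left]
      exact ⟨rest, rfl⟩
  have hfind : PySem.Str.find raw "{" = F := by
    rw [hF, PySem.Str.find_eq]
    rfl
  rw [hfind]
  omega

theorem pv_lstrip_ws (ws t : List Char) (hws : ∀ c ∈ ws, PySem.Chars.isspace c = true) :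
    PySem.Chars.lstrip (ws ++ '{' :: t) = '{' :: t := by
  induction ws with
  | nil =>
    have : PySem.Chars.isspace '{' = false := by decide
    simp [PySem.Chars.lstrip, this]
  | cons w ws' ih =>
    have hw := hws w (by simp)
    simp only [PySem.Chars.lstrip, List.cons_append, List.dropWhile_cons, hw, if_true]
    exact ih (fun c hc => hws c (by simp [hc]))

-- ===== VERDICT (by name: the statement is the Claim_ definition above) =====
theorem salvage_truncated_py_spec : Claim_equal_salvage_truncated_py := by
  intro raw _hdom
  unfold Spec_salvage_truncated_py
  unfold salvage_truncated_py salvage_truncated_py_alt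
  by_cases hg : PySem.Str.startswith (PySem.Str.lstrip raw) "{" = true
  case neg =>
    have hg' : PySem.Str.startswith (PySem.Str.lstrip raw) "{" = false := by
      simpa using hg
    simp only [hg', Bool.not_false, if_true]
  case pos =>
    -- decompose raw into its whitespace prefix and '{' :: t
    have hpre : ('{' :: ((PySem.Chars.lstrip raw.toList).tail)) = PySem.Chars.lstrip raw.toList := by
      have h1 : PySem.Str.startswith (PySem.Str.lstrip raw) "{" =
          PySem.Chars.startswith (PySem.Str.lstrip raw).toList ['{'] := by
        rw [PySem.Str.startswith_eq]; rfl
      rw [h1] at hg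
      have h2 := (PySem.Chars.startswith_iff _ _).mp hg
      rw [PySem.Str.toList_lstrip] at h2
      rcases h2 with ⟨t, ht⟩
      rw [← ht]
      simp
    set t := (PySem.Chars.lstrip raw.toList).tail with htdef
    set ws := raw.toList.takeWhile PySem.Chars.isspace with hwsdef
    have hdw : raw.toList.dropWhile PySem.Chars.isspace = '{' :: t := hpre.symm
    have hsplit : raw.toList = ws ++ '{' :: t := by
      conv_lhs => rw [← List.takeWhile_append_dropWhile (p := PySem.Chars.isspace) (l := raw.toList)]
      rw [hdw]
    have hws : ∀ c ∈ ws, PySem.Chars.isspace c = true := fun c hc => List.mem_takeWhile_imp hc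
    have hfind : PySem.Str.find raw "{" = (ws.length : Int) := pv_find_ws raw ws t hsplit hws
    have hdrop : PySem.List.slice raw.toList (some (ws.length : Int)) none = '{' :: t := by
      rw [PySem.List.slice_from raw.toList (by positivity)]
      rw [Int.toNat_natCast, hsplit, List.drop_left]
    have hBscan : pvScan raw.toList 0 (0, 0, false, false) none =
        pvScan ('{' :: t) (ws.length : Int) (0, 0, false, false) none := by
      rw [hsplit, pvScan_ws ws hws ('{' :: t) 0 0 0 false none, zero_add]
    simp only [hg, Bool.not_true, Bool.false_eq_true, if_false, hfind, hdrop]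
    rw [pyB_foldl_eq_scan raw.toList 0 0 0 false false none, hBscan]
    rw [pyA_loop1_eq_scan ('{' :: t) (ws.length : Int) 0 0 false false (-1)]
    cases hS : pvScan ('{' :: t) (ws.length : Int) (0, 0, false, false) none with
    | none => simp
    | some j =>
      obtain ⟨k, hk, hj, hfold⟩ := pvScan_some ('{' :: t) (ws.length : Int) (0, 0, false, false) j hS
      have hk0 : k ≠ 0 := by
        rintro rfl
        simp [List.take_zero] at hfold
      obtain ⟨k', rfl⟩ : ∃ k', k = k' + 1 := ⟨k - 1, by omega⟩
      have hj0 : ¬ (j < 0) := by omega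
      have hjt : j.toNat = ws.length + (k' + 1) := by omega
      simp only [Option.getD_some, hj0, if_false]
      have htrim : PySem.List.slice raw.toList (some (ws.length : Int)) (some j) =
          '{' :: t.take k' := by
        rw [PySem.List.slice_toNat raw.toList (by positivity) (by omega)]
        rw [Int.toNat_natCast, hjt, hsplit]
        rw [List.drop_left]
        simp [List.take_succ_cons]
      have hloop2 : pyA_loop2 ('{' :: t.take k') 0 0 false false = (1, 0) := by
        rw [pyA_loop2_eq_fold]
        have : ('{' :: t.take k') = (('{' :: t).take (k' + 1)) := by simp [List.take_succ_cons]
        rw [this, hfold]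
      have hBslice : PySem.List.slice raw.toList none (some j) = ws ++ '{' :: t.take k' := by
        rw [PySem.List.slice_to raw.toList (by omega), hjt, hsplit]
        rw [List.take_append]
        simp [List.take_succ_cons]
      rw [htrim, hloop2, hBslice, pv_lstrip_ws ws (t.take k') hws]
      simp [PySem.List.pyRepeat_singleton]
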